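-- pv_equiv track=rewrite | github.com/numarulunu/kontext | pipeline/chunker.py | _group_by_conversation
-- ===== SOURCE A (Python) =====
-- def _group_by_conversation(messages: list[dict]) -> list[list[dict]]:
--     """
--     Group messages into conversations.
--     A conversation = all consecutive messages with the same conversation_title.
--     If title is None, each message is its own "conversation".
--     """
--     if not messages:
--         return []
--
--     groups: list[list[dict]] = []
--     current_group: list[dict] = [messages[0]]
--     current_title = messages[0].get("conversation_title")
--
--     for msg in messages[1:]:
--         msg_title = msg.get("conversation_title")
--
--         # Same conversation if titles match and are not None
--         if msg_title is not None and msg_title == current_title: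
--             current_group.append(msg)
--         else:
--             groups.append(current_group)
--             current_group = [msg]
--             current_title = msg_title
--
--     if current_group:
--         groups.append(current_group)
--
--     return groups
-- ===== SOURCE B (Python) =====
-- def _group_by_conversation(messages: list[dict]) -> list[list[dict]]:
--     """
--     Group messages into conversations (consecutive messages sharing a
--     non-None conversation_title; each None-titled message is its own group)
--     by a two-pointer scan: find each group's end index j and emit the
--     slice messages[i:j] directly.
--     """
--     groups: list[list[dict]] = []
--     n = len(messages)
--     i = 0
--     while i < n:
--         title = messages[i].get("conversation_title")
--         j = i + 1
--         if title is not None: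
--             while j < n and messages[j].get("conversation_title") == title:
--                 j += 1
--         groups.append(messages[i:j])
--         i = j
--     return groups
-- ===== Notes on version B (the rewrite author's own statement) =====
-- stated objective: alternative
-- what changed: Replaces A's per-element accumulator (current_group/current_title with a final flush) by a two-pointer scan: an inner loop advances j to the end of the current group and the group is emitted as the slice messages[i:j].
import Mathlib
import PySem

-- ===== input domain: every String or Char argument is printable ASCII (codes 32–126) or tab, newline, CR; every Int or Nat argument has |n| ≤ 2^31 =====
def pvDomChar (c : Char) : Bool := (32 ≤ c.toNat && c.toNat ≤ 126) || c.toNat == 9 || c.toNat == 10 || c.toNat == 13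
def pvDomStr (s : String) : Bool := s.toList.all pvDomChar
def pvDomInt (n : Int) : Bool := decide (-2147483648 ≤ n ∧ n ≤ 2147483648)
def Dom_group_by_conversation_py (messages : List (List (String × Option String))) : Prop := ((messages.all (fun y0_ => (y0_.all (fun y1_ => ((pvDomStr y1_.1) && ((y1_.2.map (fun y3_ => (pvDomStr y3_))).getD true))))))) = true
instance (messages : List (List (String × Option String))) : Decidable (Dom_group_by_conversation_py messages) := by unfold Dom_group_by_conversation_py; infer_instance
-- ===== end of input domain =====

-- B replaces A's per-element current_group/current_title accumulator (with final flush)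
-- by a two-pointer scan that finds each group's end index and emits the slice messages[i:j].

-- msg.get("conversation_title"): first matching key, None if absent (shared lookup helper)
def pyGetTitle (m : List (String × Option String)) : Option String :=
  match m.find? (fun kv => kv.1 == "conversation_title") with
  | some kv => kv.2
  | none => none

-- ===== PORT A =====
-- the for-loop over messages[1:] carrying (groups, current_group, current_title)
def aLoop (groups : List (List (List (String × Option String))))
    (cur : List (List (String × Option String))) (curT : Option String) :
    List (List (String × Option String)) → List (List (List (String × Option String)))
  | [] => if cur.isEmpty then groups else groups ++ [cur]   -- "if current_group: groups.append(current_group)"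
  | msg :: rest =>
    let msgT := pyGetTitle msg
    if msgT.isSome && msgT == curT then aLoop groups (cur ++ [msg]) curT rest
    else aLoop (groups ++ [cur]) [msg] msgT rest

def group_by_conversation_py (messages : List (List (String × Option String))) : List (List (List (String × Option String))) :=
  match messages with
  | [] => []
  | m0 :: rest => aLoop [] [m0] (pyGetTitle m0) rest

-- ===== PORT B =====
-- inner while loop: "while j < n and messages[j].get(...) == title: j += 1"
-- (messages[j] with j < n is in range in Python, so getD never takes its default)
def bInner (messages : List (List (String × Option String))) (t : String) (j : Nat) : Nat :=
  if j < messages.length && (pyGetTitle (messages.getD j []) == some t) then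
    bInner messages t (j + 1)
  else j
termination_by messages.length - j
decreasing_by simp_all; omega

-- the inner loop never moves j backwards (needed for the outer loop's termination)
lemma bInner_ge (messages : List (List (String × Option String))) (t : String) :
    ∀ j, j ≤ bInner messages t j := by
  intro j
  induction hk : messages.length - j using Nat.strong_induction_on generalizing j with
  | _ k ih =>
    rw [bInner]
    split
    · next h =>
      simp at h
      have := ih (messages.length - (j + 1)) (by omega) (j + 1) rfl
      omega
    · exact le_refl j

-- outer while loop: "while i < n: … groups.append(messages[i:j]); i = j"
def bOuter (messages : List (List (String × Option String)))
    (groups : List (List (List (String × Option String)))) (i : Nat) :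
    List (List (List (String × Option String))) :=
  if _h : i < messages.length then
    let title := pyGetTitle (messages.getD i [])
    let j : Nat := match title with
      | some t => bInner messages t (i + 1)
      | none => i + 1
    bOuter messages (groups ++ [PySem.List.slice messages (some (i : Int)) (some (j : Int))]) j
  else groups
termination_by messages.length - i
decreasing_by
  have hj : i + 1 ≤ (match pyGetTitle (messages.getD i []) with
      | some t => bInner messages t (i + 1)
      | none => i + 1) := by
    cases pyGetTitle (messages.getD i []) with
    | none => simp
    | some t => exact bInner_ge messages t (i + 1)
  omega

def group_by_conversation_py_alt (messages : List (List (String × Option String))) : List (List (List (String × Option String))) :=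
  bOuter messages [] 0

-- ===== PRECONDITION & SPEC =====
def Spec_group_by_conversation_py (messages : List (List (String × Option String))) (out : List (List (List (String × Option String)))) : Prop := out = group_by_conversation_py_alt messages
instance (messages : List (List (String × Option String))) (out : List (List (List (String × Option String)))) : Decidable (Spec_group_by_conversation_py messages out) := by unfold Spec_group_by_conversation_py; infer_instance

-- ===== CLAIM (what is proved, stated in full; the proofs are below) =====
def Claim_equal_group_by_conversation_py : Prop := ∀ (messages : List (List (String × Option String))), Dom_group_by_conversation_py messages → Spec_group_by_conversation_py messages (group_by_conversation_py messages)

-- ===== LEMMAS AND PROOFS =====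

-- A merges msg into the current group iff its title is a Some equal to the previous message's title
def pvMerge (m y : List (String × Option String)) : Bool :=
  (pyGetTitle y).isSome && (pyGetTitle y == pyGetTitle m)

-- canonical consecutive grouping both ports are reduced to
def pvCanon (m : List (String × Option String)) :
    List (List (String × Option String)) →
    List (List (String × Option String)) × List (List (List (String × Option String)))
  | [] => ([m], [])
  | y :: ys =>
    if pvMerge m y then ((pvCanon y ys).1.cons m, (pvCanon y ys).2)
    else ([m], (pvCanon y ys).1 :: (pvCanon y ys).2)

def pvCanonTop : List (List (String × Option String)) → List (List (List (String × Option String)))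
  | [] => []
  | m :: ms => (pvCanon m ms).1 :: (pvCanon m ms).2

lemma aLoop_eq : ∀ (rest : List (List (String × Option String))) cur m groups,
    aLoop groups (cur ++ [m]) (pyGetTitle m) rest
      = groups ++ (cur ++ (pvCanon m rest).1) :: (pvCanon m rest).2 := by
  intro rest
  induction rest with
  | nil => intro cur m groups; simp [aLoop, pvCanon]
  | cons y ys ih =>
    intro cur m groups
    by_cases h : pvMerge m y = true
    · have h' := h
      simp only [pvMerge, Bool.and_eq_true, beq_iff_eq] at h'
      obtain ⟨hs, hT⟩ := h'
      rw [aLoop]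
      have hcond : ((pyGetTitle y).isSome && (pyGetTitle y == pyGetTitle m)) = true := by
        simp [hT]; rw [← hT]; exact hs
      rw [if_pos hcond, ← hT, ih (cur ++ [m]) y groups]
      simp [pvCanon, h]
    · rw [aLoop]
      have hcond : ((pyGetTitle y).isSome && (pyGetTitle y == pyGetTitle m)) = false := by
        unfold pvMerge at h; simpa using h
      rw [if_neg (by simp [hcond])]
      have := ih [] y (groups ++ [cur ++ [m]])
      simp only [List.nil_append] at this
      rw [this]
      simp [pvCanon, h]

-- a None-titled message is always its own group
lemma pvCanon_none (m : List (String × Option String)) (ms : List (List (String × Option String)))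
    (h : pyGetTitle m = none) : pvCanon m ms = ([m], pvCanonTop ms) := by
  cases ms with
  | nil => simp [pvCanon, pvCanonTop]
  | cons y ys =>
    have hm : pvMerge m y = false := by
      cases hy : pyGetTitle y <;> simp [pvMerge, h, hy]
    simp [pvCanon, hm, pvCanonTop]

-- with a Some title, the canonical first group is a takeWhile on that title
lemma pvCanon_some (t : String) : ∀ (ms : List (List (String × Option String)))
    (m : List (String × Option String)), pyGetTitle m = some t →
    pvCanon m ms = (m :: ms.takeWhile (fun y => pyGetTitle y == some t),
                    pvCanonTop (ms.dropWhile (fun y => pyGetTitle y == some t))) := by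
  intro ms
  induction ms with
  | nil => intro m h; simp [pvCanon, pvCanonTop]
  | cons y ys ih =>
    intro m h
    have hm : pvMerge m y = (pyGetTitle y == some t) := by
      cases hy : pyGetTitle y <;> simp [pvMerge, h, hy]
    by_cases hy : (pyGetTitle y == some t) = true
    · have hyt : pyGetTitle y = some t := by simpa using hy
      simp only [pvCanon, hm, hy]
      rw [ih y hyt]
      simp [List.takeWhile, List.dropWhile, hy]
    · have hy' : (pyGetTitle y == some t) = false := by simpa using hy
      simp [pvCanon, hm, hy', pvCanonTop, List.takeWhile, List.dropWhile]

-- the inner loop counts the takeWhile run beginning at j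
lemma bInner_eq (messages : List (List (String × Option String))) (t : String) :
    ∀ j, bInner messages t j
      = j + ((messages.drop j).takeWhile (fun y => pyGetTitle y == some t)).length := by
  intro j
  induction hk : messages.length - j using Nat.strong_induction_on generalizing j with
  | _ k ih =>
    rw [bInner]
    by_cases hj : j < messages.length
    · have hdrop : messages.drop j = messages[j] :: messages.drop (j + 1) :=
        List.drop_eq_getElem_cons hj
      have hget : messages[j]? = some messages[j] := List.getElem?_eq_getElem hj
      by_cases ht : (pyGetTitle messages[j] == some t) = true
      · rw [if_pos (by simp [List.getD, hj, ht])]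
        rw [ih (messages.length - (j + 1)) (by omega) (j + 1) rfl]
        rw [hdrop]
        simp [List.takeWhile, ht]
        omega
      · rw [if_neg (by simp [List.getD, hget]; intro _; simpa using ht)]
        rw [hdrop]
        simp [List.takeWhile, ht]
    · rw [if_neg (by simp [hj])]
      rw [List.drop_eq_nil_of_le (by omega)]
      simp
lemma take_takeWhile_len {α : Type} (p : α → Bool) :
    ∀ (l : List α), l.take (l.takeWhile p).length = l.takeWhile p := by
  intro l
  induction l with
  | nil => simp
  | cons x xs ih =>
    by_cases h : p x = true <;> simp [List.takeWhile, h, ih]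

lemma drop_takeWhile_len {α : Type} (p : α → Bool) :
    ∀ (l : List α), l.drop (l.takeWhile p).length = l.dropWhile p := by
  intro l
  induction l with
  | nil => simp
  | cons x xs ih =>
    by_cases h : p x = true <;> simp [List.takeWhile, List.dropWhile, h, ih]

-- the outer loop produces the canonical grouping of the suffix from i
lemma bOuter_eq (messages : List (List (String × Option String))) :
    ∀ i groups, bOuter messages groups i = groups ++ pvCanonTop (messages.drop i) := by
  intro i
  induction hk : messages.length - i using Nat.strong_induction_on generalizing i with
  | _ k ih =>
    intro groups
    rw [bOuter.eq_def]
    by_cases hi : i < messages.length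
    · rw [dif_pos hi]
      have hget : messages.getD i [] = messages[i] := List.getD_eq_getElem _ _ hi
      have hdrop : messages.drop i = messages[i] :: messages.drop (i + 1) :=
        List.drop_eq_getElem_cons hi
      cases ht : pyGetTitle messages[i] with
      | none =>
        simp only [hget, ht]
        rw [ih (messages.length - (i + 1)) (by omega) (i + 1) rfl _]
        have hs : PySem.List.slice messages (some (i : Int)) (some ((i + 1 : Nat) : Int))
            = [messages[i]] := by
          rw [PySem.List.slice_natCast, show i + 1 - i = 1 by omega, hdrop]
          rfl
        have hc : pvCanonTop (messages.drop i) = [messages[i]] :: pvCanonTop (messages.drop (i + 1)) := by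
          rw [hdrop]
          show (pvCanon _ _).1 :: (pvCanon _ _).2 = _
          rw [pvCanon_none _ _ ht]
        rw [hs, hc]
        simp
      | some t =>
        simp only [hget, ht]
        have hbi := bInner_eq messages t (i + 1)
        set tw := ((messages.drop (i + 1)).takeWhile (fun y => pyGetTitle y == some t)) with htw
        have hlen : tw.length ≤ (messages.drop (i + 1)).length := by
          rw [htw]; exact (List.takeWhile_sublist _).length_le
        have hlen' : (messages.drop (i + 1)).length = messages.length - (i + 1) :=
          List.length_drop
        rw [hbi]
        rw [ih (messages.length - (i + 1 + tw.length)) (by omega) (i + 1 + tw.length) rfl _]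
        have hs : PySem.List.slice messages (some (i : Int)) (some ((i + 1 + tw.length : Nat) : Int))
            = messages[i] :: tw := by
          rw [PySem.List.slice_natCast, show i + 1 + tw.length - i = tw.length + 1 by omega,
            hdrop, List.take_succ_cons]
          exact congrArg (messages[i] :: ·) (take_takeWhile_len _ _)
        have hd : messages.drop (i + 1 + tw.length)
            = (messages.drop (i + 1)).dropWhile (fun y => pyGetTitle y == some t) := by
          rw [← drop_takeWhile_len (fun y => pyGetTitle y == some t) (messages.drop (i + 1)),
            ← htw, List.drop_drop]
        have hc : pvCanonTop (messages.drop i)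
            = (messages[i] :: tw) :: pvCanonTop ((messages.drop (i + 1)).dropWhile (fun y => pyGetTitle y == some t)) := by
          rw [hdrop]
          show (pvCanon _ _).1 :: (pvCanon _ _).2 = _
          rw [pvCanon_some t _ _ ht, ← htw]
        rw [hs, hd, hc]
        simp
    · rw [dif_neg hi]
      rw [List.drop_eq_nil_of_le (by omega)]
      simp [pvCanonTop]

-- ===== VERDICT (by name: the statement is the Claim_ definition above) =====
theorem group_by_conversation_py_spec : Claim_equal_group_by_conversation_py := by
  intro messages _
  unfold Spec_group_by_conversation_py
  unfold group_by_conversation_py group_by_conversation_py_alt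
  rw [bOuter_eq messages 0 []]
  cases messages with
  | nil => rfl
  | cons m rest =>
    show aLoop [] [m] (pyGetTitle m) rest = [] ++ pvCanonTop (List.drop 0 (m :: rest))
    have hA := aLoop_eq rest [] m []
    simp only [List.nil_append] at hA
    rw [List.drop_zero, hA]
    simp [pvCanonTop]
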